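-- pv_equiv track=rewrite | github.com/thcborges/CompCEDERJ-FP | exercicios/AD2 0.0/questao1b.py | obterSetor
-- ===== SOURCE A (Python) =====
-- def car(dados):
--     return dados[0]
--
-- def cdr(dados):
--     return dados[1:len(dados)]
--
-- def cons(item, dados):
--     return [item] + dados
--
-- def obterSetor(lista, inicio, fim):
--     if lista == []:
--         return []
--     else:
--         if fim < inicio:
--             return []
--         else:
--             if inicio > 1:
--                 return obterSetor(cdr(lista), inicio - 1, fim - 1)
--             else:
--                 return cons(car(lista), obterSetor(cdr(lista), inicio, fim - 1))
-- ===== SOURCE B (Python) =====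
-- def obterSetor(lista, inicio, fim):
--     skip = inicio - 1 if inicio > 1 else 0
--     count = fim - inicio + 1
--     if count <= 0:
--         return []
--     return lista[skip:skip + count]
-- ===== Notes on version B (the rewrite author's own statement) =====
-- stated objective: simpler
-- what changed: Replaces the element-by-element cons recursion by a closed-form slice: compute skip = max(inicio-1,0) (skip only when inicio>1) and count = fim-inicio+1, then return lista[skip:skip+count].
import Mathlib
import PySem

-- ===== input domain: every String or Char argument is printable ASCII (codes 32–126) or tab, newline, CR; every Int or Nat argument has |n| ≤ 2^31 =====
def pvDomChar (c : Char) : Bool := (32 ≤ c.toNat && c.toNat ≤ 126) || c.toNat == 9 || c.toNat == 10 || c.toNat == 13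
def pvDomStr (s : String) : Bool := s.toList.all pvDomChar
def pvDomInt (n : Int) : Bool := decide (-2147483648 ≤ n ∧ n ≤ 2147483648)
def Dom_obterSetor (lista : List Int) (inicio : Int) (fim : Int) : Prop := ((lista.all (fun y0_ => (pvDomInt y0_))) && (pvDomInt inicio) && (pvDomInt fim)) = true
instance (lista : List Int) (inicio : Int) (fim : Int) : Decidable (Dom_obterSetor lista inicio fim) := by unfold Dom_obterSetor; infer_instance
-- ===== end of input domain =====

-- B replaces A's element-by-element cons recursion with a closed-form slice (skip/count); simpler, no recursion.


-- ===== PORT A =====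
def obterSetor : List Int → Int → Int → List Int
  | [], _, _ => []
  | (x :: xs), inicio, fim =>
    if fim < inicio then []
    else if inicio > 1 then obterSetor xs (inicio - 1) (fim - 1)
    else x :: obterSetor xs inicio (fim - 1)

-- ===== PORT B =====
def obterSetor_alt (lista : List Int) (inicio : Int) (fim : Int) : List Int :=
  let skip : Int := if inicio > 1 then inicio - 1 else 0
  let count : Int := fim - inicio + 1
  if count ≤ 0 then []
  else (lista.drop skip.toNat).take count.toNat  -- lista[skip : skip+count] with skip ≥ 0, count > 0

-- ===== PRECONDITION & SPEC =====
def Spec_obterSetor (lista : List Int) (inicio : Int) (fim : Int) (out : List Int) : Prop := out = obterSetor_alt lista inicio fim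
instance (lista : List Int) (inicio : Int) (fim : Int) (out : List Int) : Decidable (Spec_obterSetor lista inicio fim out) := by unfold Spec_obterSetor; infer_instance

-- ===== CLAIM (what is proved, stated in full; the proofs are below) =====
def Claim_equal_obterSetor : Prop := ∀ (lista : List Int) (inicio : Int) (fim : Int), Dom_obterSetor lista inicio fim → Spec_obterSetor lista inicio fim (obterSetor lista inicio fim)

-- ===== LEMMAS AND PROOFS =====
theorem obterSetor_eq_alt (lista : List Int) (inicio fim : Int) :
    obterSetor lista inicio fim = obterSetor_alt lista inicio fim := by
  induction lista generalizing inicio fim with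
  | nil => simp [obterSetor, obterSetor_alt]
  | cons x xs ih =>
    by_cases h1 : fim < inicio
    · simp only [obterSetor, obterSetor_alt, if_pos h1]
      rw [if_pos (by omega : fim - inicio + 1 ≤ 0)]
    · by_cases h2 : inicio > 1
      · rw [show obterSetor (x :: xs) inicio fim = obterSetor xs (inicio - 1) (fim - 1) by
          simp [obterSetor, h1, h2], ih]
        simp only [obterSetor_alt]
        have hc : fim - inicio + 1 = (fim - 1) - (inicio - 1) + 1 := by ring
        rw [← hc]
        by_cases hc0 : fim - inicio + 1 ≤ 0
        · simp [hc0]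
        · simp only [hc0, if_false]
          have hskip : (if inicio > 1 then inicio - 1 else 0).toNat
              = ((if inicio - 1 > 1 then inicio - 1 - 1 else 0).toNat) + 1 := by
            split_ifs <;> omega
          rw [hskip]
          simp
      · rw [show obterSetor (x :: xs) inicio fim = x :: obterSetor xs inicio (fim - 1) by
          simp [obterSetor, h1, h2], ih]
        simp only [obterSetor_alt]
        have hs : (if inicio > 1 then inicio - 1 else 0) = (0 : Int) := by omega
        rw [hs]
        have hc0 : ¬ (fim - inicio + 1 ≤ 0) := by omega
        simp only [hc0, if_false, Int.toNat_zero, List.drop_zero]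
        by_cases hc1 : (fim - 1) - inicio + 1 ≤ 0
        · have : (fim - inicio + 1).toNat = 1 := by omega
          simp [hc1, this]
        · have : (fim - inicio + 1).toNat = ((fim - 1) - inicio + 1).toNat + 1 := by omega
          simp [hc1, this]

-- ===== VERDICT (by name: the statement is the Claim_ definition above) =====
theorem obterSetor_spec : Claim_equal_obterSetor := by
  intro lista inicio fim _
  exact obterSetor_eq_alt lista inicio fim
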